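-- pv_equiv track=rewrite | github.com/yanalauzer/algorithms2 | 2.1-yanalauzer/20.py | count_almost_palindromes
-- ===== SOURCE A (Python) =====
-- def is_almost_palindrome(word, k):
--     n = len(word)
--     for i in range(n // 2):
--         if word[i] != word[n - 1 - i]:
--             k -= 1
--             if k < 0:
--                 return False
--     return True
--
-- def count_almost_palindromes(word, k):
--     count = 0
--     for i in range(len(word)):
--         for j in range(i + 1, len(word) + 1):
--             substring = word[i:j]
--             if is_almost_palindrome(substring, k):
--                 count += 1
--     return count
-- ===== SOURCE B (Python) =====
-- def count_almost_palindromes(word, k):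
--     # O(n^2) DP: mismatch count of word[i:j] = mismatch of word[i+1:j-1] + (word[i] != word[j-1]).
--     n = len(word)
--     kk = k if k > 0 else 0  # substrings with 0 mismatches count even for negative k
--     total = 0
--     prev = [0] * (n + 1)  # prev[j] = mismatch count of word[i+1:j]
--     for i in range(n - 1, -1, -1):
--         row = [0] * (n + 1)
--         for j in range(i + 1, n + 1):
--             if j == i + 1:
--                 m = 0
--             else:
--                 m = prev[j - 1] + (1 if word[i] != word[j - 1] else 0)
--             row[j] = m
--             if m <= kk:
--                 total += 1
--         prev = row
--     return total
-- ===== Notes on version B (the rewrite author's own statement) =====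
-- stated objective: faster
-- what changed: Replaces the per-substring symmetric scan (for every (i,j) rescan the whole substring) by a dynamic-programming table: the mismatch count of word[i:j] is computed in O(1) from that of word[i+1:j-1], rows filled bottom-up.
import Mathlib
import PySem

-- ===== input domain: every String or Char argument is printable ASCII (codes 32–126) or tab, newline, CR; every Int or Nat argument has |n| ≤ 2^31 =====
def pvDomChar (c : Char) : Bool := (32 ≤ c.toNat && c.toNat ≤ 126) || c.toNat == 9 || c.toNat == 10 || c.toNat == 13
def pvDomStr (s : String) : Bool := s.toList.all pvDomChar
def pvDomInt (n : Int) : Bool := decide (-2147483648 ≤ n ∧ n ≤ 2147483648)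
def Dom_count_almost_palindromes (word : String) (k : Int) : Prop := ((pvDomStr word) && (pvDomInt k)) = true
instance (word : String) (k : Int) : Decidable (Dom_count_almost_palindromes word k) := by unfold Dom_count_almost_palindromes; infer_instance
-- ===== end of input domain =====

-- ===== PORT A =====
-- B is an O(n^2) DP re-implementation of A's O(n^3) scan; proved to return A's value on all inputs.
-- Ports index with List.getD at provably in-range indices (exact: Python never goes out of range here);
-- word[i:j] with 0 <= i <= j <= n is PySem.List.slice, range(...) loops are List.range / List.range' folds.

-- the loop of is_almost_palindrome: remaining indices, running budget k, early return False
def isapGo (w : List Char) (n : Nat) : Int → List Nat → Bool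
  | _, [] => true
  | k, i :: rest =>
    if w.getD i ' ' ≠ w.getD (n - 1 - i) ' ' then
      if k - 1 < 0 then false else isapGo w n (k - 1) rest
    else isapGo w n k rest

def is_almost_palindrome (w : List Char) (k : Int) : Bool :=
  isapGo w w.length k (List.range (w.length / 2))

def count_almost_palindromes (word : String) (k : Int) : Int :=
  let w := word.toList
  (List.range w.length).foldl
    (fun count i =>
      (List.range' (i + 1) (w.length - i)).foldl
        (fun (count : Int) (j : Nat) =>
          let substring := PySem.List.slice w (some (i : Int)) (some (j : Int))
          if is_almost_palindrome substring k then count + 1 else count)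
        count)
    0

-- ===== PORT B =====
def count_almost_palindromes_alt (word : String) (k : Int) : Int :=
  let w := word.toList
  let n := w.length
  let kk : Int := if k > 0 then k else 0
  let res := (List.range n).reverse.foldl
    (fun (st : List Int × Int) i =>
      (List.range' (i + 1) (n - i)).foldl
        (fun (rt : List Int × Int) j =>
          let m : Int :=
            if j = i + 1 then 0
            else st.1.getD (j - 1) 0 + (if w.getD i ' ' ≠ w.getD (j - 1) ' ' then 1 else 0)
          (rt.1.set j m, if m ≤ kk then rt.2 + 1 else rt.2))
        (List.replicate (n + 1) 0, st.2))
    (List.replicate (n + 1) 0, 0)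
  res.2

-- ===== PRECONDITION & SPEC =====
def Spec_count_almost_palindromes (word : String) (k : Int) (out : Int) : Prop := out = count_almost_palindromes_alt word k
instance (word : String) (k : Int) (out : Int) : Decidable (Spec_count_almost_palindromes word k out) := by unfold Spec_count_almost_palindromes; infer_instance

-- ===== CLAIM (what is proved, stated in full; the proofs are below) =====
def Claim_equal_count_almost_palindromes : Prop := ∀ (word : String) (k : Int), Dom_count_almost_palindromes word k → Spec_count_almost_palindromes word k (count_almost_palindromes word k)

-- ===== LEMMAS AND PROOFS =====

-- number of symmetric mismatches of a list (what is_almost_palindrome's loop inspects)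
def msm (w : List Char) : Nat :=
  (List.range (w.length / 2)).countP (fun p => w.getD p ' ' ≠ w.getD (w.length - 1 - p) ' ')

-- mismatch count of w[i:j] as an Int
def msmIJ (w : List Char) (i j : Nat) : Int :=
  (msm ((w.drop i).take (j - i)) : Int)

lemma isapGo_eq (w : List Char) (n : Nat) (idxs : List Nat) (k : Int) :
    isapGo w n k idxs
      = decide ((idxs.countP (fun i => w.getD i ' ' ≠ w.getD (n - 1 - i) ' ') : Int) ≤ max k 0) := by
  induction idxs generalizing k with
  | nil => simp [isapGo]
  | cons i rest ih =>
    by_cases h : w.getD i ' ' ≠ w.getD (n - 1 - i) ' '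
    · have hd : (decide (w.getD i ' ' ≠ w.getD (n - 1 - i) ' ')) = true := by simpa using h
      by_cases hk : k - 1 < 0
      · simp only [isapGo, if_pos h, if_pos hk]
        rw [eq_comm, decide_eq_false_iff_not]
        rw [List.countP_cons, hd, if_pos rfl]
        push_cast
        omega
      · simp only [isapGo, if_pos h, if_neg hk, ih]
        rw [decide_eq_decide]
        rw [List.countP_cons, hd, if_pos rfl]
        push_cast
        omega
    · have hd : (decide (w.getD i ' ' ≠ w.getD (n - 1 - i) ' ')) = false := by simpa using h
      simp only [isapGo, if_neg h, ih]
      rw [decide_eq_decide]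
      rw [List.countP_cons, hd, if_neg Bool.false_ne_true]
      push_cast
      omega

lemma isap_eq (s : List Char) (k : Int) :
    is_almost_palindrome s k = decide ((msm s : Int) ≤ max k 0) := by
  rw [is_almost_palindrome, isapGo_eq, msm]

-- counting foldl (the accumulator pattern of both inner loops)
lemma foldl_count {α : Type} (p : α → Bool) (l : List α) (c : Int) :
    l.foldl (fun c x => if p x then c + 1 else c) c = c + (l.countP p : Int) := by
  induction l generalizing c with
  | nil => simp
  | cons x rest ih =>
    simp only [List.foldl_cons, List.countP_cons, ih]
    by_cases h : p x = true
    · rw [if_pos h, if_pos h]; push_cast; ring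
    · rw [if_neg h, if_neg h]; push_cast; ring

-- short substrings have no symmetric pair
lemma msm_small (w : List Char) (h : w.length ≤ 1) : msm w = 0 := by
  unfold msm
  have : w.length / 2 = 0 := by omega
  simp [this]

lemma msmIJ_small (w : List Char) (i j : Nat) (h : j ≤ i + 1) : msmIJ w i j = 0 := by
  unfold msmIJ
  rw [msm_small]
  · simp
  · have := List.length_take_le (j - i) (w.drop i)
    omega

-- peel the two end characters off a symmetric-mismatch count
lemma msm_peel (a b : Char) (v : List Char) :
    msm (a :: (v ++ [b])) = msm v + (if a ≠ b then 1 else 0) := by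
  unfold msm
  have hlen : (a :: (v ++ [b])).length = v.length + 2 := by simp
  have hhalf : (a :: (v ++ [b])).length / 2 = v.length / 2 + 1 := by rw [hlen]; omega
  have hL : (a :: (v ++ [b])).getD ((a :: (v ++ [b])).length - 1 - 0) ' ' = b := by
    rw [hlen]
    have e : v.length + 2 - 1 - 0 = v.length + 1 := by omega
    rw [e, List.getD_cons_succ, List.getD_append_right v [b] ' ' v.length (le_refl _)]
    simp
  have h0 : (a :: (v ++ [b])).getD 0 ' ' = a := rfl
  rw [hhalf, List.range_succ_eq_map, List.countP_cons, List.countP_map]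
  congr 1
  · refine List.countP_congr ?_
    intro p hp
    have hp' : p < v.length / 2 := List.mem_range.mp hp
    have hpv : p < v.length := by omega
    have e1 : (a :: (v ++ [b])).getD (Nat.succ p) ' ' = v.getD p ' ' := by
      rw [List.getD_cons_succ, List.getD_append v [b] ' ' p hpv]
    have e2 : (a :: (v ++ [b])).getD ((a :: (v ++ [b])).length - 1 - Nat.succ p) ' '
        = v.getD (v.length - 1 - p) ' ' := by
      rw [hlen]
      have e3 : v.length + 2 - 1 - Nat.succ p = Nat.succ (v.length - 1 - p) := by omega
      rw [e3, List.getD_cons_succ, List.getD_append v [b] ' ' _ (by omega)]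
    simp only [Function.comp_apply, e1, e2]
  · rw [h0, hL]
    simp

-- decompose w[i:j] (as drop/take) into first char, middle, last char
lemma sub_decomp (w : List Char) (i j : Nat) (h2 : i + 2 ≤ j) (hj : j ≤ w.length) :
    (w.drop i).take (j - i)
      = w.getD i ' ' :: (((w.drop (i + 1)).take ((j - 1) - (i + 1))) ++ [w.getD (j - 1) ' ']) := by
  have hi : i < w.length := by omega
  have hj1 : j - 1 < w.length := by omega
  rw [List.getD_eq_getElem w ' ' hi, List.getD_eq_getElem w ' ' hj1]
  rw [List.drop_eq_getElem_cons hi]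
  have e1 : j - i = (j - i - 2) + 1 + 1 := by omega
  rw [e1, List.take_succ_cons]
  congr 1
  have e2 : (j - 1) - (i + 1) = j - i - 2 := by omega
  rw [e2, List.take_add_one]
  congr 1
  rw [List.getElem?_drop]
  have e3 : i + 1 + (j - i - 2) = j - 1 := by omega
  rw [e3, List.getElem?_eq_getElem hj1]
  rfl

-- the DP recurrence is exactly the mismatch count
lemma msm_rec (w : List Char) (i j : Nat) (h2 : i + 2 ≤ j) (hj : j ≤ w.length) :
    msmIJ w i j = msmIJ w (i + 1) (j - 1) + (if w.getD i ' ' ≠ w.getD (j - 1) ' ' then 1 else 0) := by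
  unfold msmIJ
  rw [sub_decomp w i j h2 hj, msm_peel]
  push_cast
  ring

-- the inner fold of port B: second component counts, first component records the row
lemma inner_snd (g : Nat → Int) (kk : Int) (jl : List Nat) (r0 : List Int) (t0 : Int) :
    ((jl.foldl (fun (rt : List Int × Int) j => (rt.1.set j (g j), if g j ≤ kk then rt.2 + 1 else rt.2)) (r0, t0)).2)
      = t0 + (jl.countP (fun j => decide (g j ≤ kk)) : Int) := by
  induction jl generalizing r0 t0 with
  | nil => simp
  | cons j rest ih =>
    simp only [List.foldl_cons, List.countP_cons, ih]
    by_cases h : g j ≤ kk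
    · rw [if_pos h, if_pos (by simpa using h)]; push_cast; ring
    · rw [if_neg h, if_neg (by simpa using h)]; push_cast; ring

lemma inner_fst (g : Nat → Int) (kk : Int) (jl : List Nat) (r0 : List Int) (t0 : Int) :
    ((jl.foldl (fun (rt : List Int × Int) j => (rt.1.set j (g j), if g j ≤ kk then rt.2 + 1 else rt.2)) (r0, t0)).1)
      = jl.foldl (fun r j => r.set j (g j)) r0 := by
  induction jl generalizing r0 t0 with
  | nil => simp
  | cons j rest ih => simp only [List.foldl_cons, ih]

lemma setFold_length (g : Nat → Int) (jl : List Nat) (r0 : List Int) :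
    (jl.foldl (fun r j => r.set j (g j)) r0).length = r0.length := by
  induction jl generalizing r0 with
  | nil => simp
  | cons j rest ih => simp [List.foldl_cons, ih]

lemma setFold_getD (g : Nat → Int) (jl : List Nat) (hnd : jl.Nodup) (r0 : List Int) (q : Nat)
    (hq : q < r0.length) :
    (jl.foldl (fun r j => r.set j (g j)) r0).getD q 0
      = if q ∈ jl then g q else r0.getD q 0 := by
  induction jl generalizing r0 with
  | nil => simp
  | cons j rest ih =>
    simp only [List.foldl_cons]
    rw [ih hnd.of_cons _ (by simpa using hq)]
    by_cases hm : q ∈ rest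
    · simp [hm, List.mem_cons]
    · rw [if_neg hm]
      by_cases hqj : q = j
      · subst hqj
        rw [if_pos List.mem_cons_self]
        rw [List.getD_eq_getElem _ _ (by simpa using hq)]
        simp
      · rw [if_neg (by simp [hqj, hm])]
        rw [List.getD_eq_getElem _ _ (by simpa using hq), List.getD_eq_getElem _ _ hq]
        have : j ≠ q := fun h => hqj h.symm
        simp [this]

-- the count of row i (number of j in (i, n] with at most kk mismatches)
def rowCnt (w : List Char) (kk : Int) (i : Nat) : Int :=
  ((List.range' (i + 1) (w.length - i)).countP (fun j => decide (msmIJ w i j ≤ kk)) : Int)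

-- the DP entry port B computes for cell (i, j) from the previous row
def gOf (w : List Char) (prev : List Int) (i j : Nat) : Int :=
  if j = i + 1 then 0
  else prev.getD (j - 1) 0 + (if w.getD i ' ' ≠ w.getD (j - 1) ' ' then 1 else 0)

-- invariant of port B's outer (descending) fold
lemma outer_fold (w : List Char) (kk : Int) (cnt : Nat) :
    cnt ≤ w.length →
    ∀ (prev : List Int) (t : Int), prev.length = w.length + 1 →
    (∀ q, cnt ≤ q → q ≤ w.length → prev.getD q 0 = msmIJ w cnt q) →
    (((List.range cnt).reverse.foldl
        (fun (st : List Int × Int) i =>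
          (List.range' (i + 1) (w.length - i)).foldl
            (fun (rt : List Int × Int) j =>
              (rt.1.set j (gOf w st.1 i j), if gOf w st.1 i j ≤ kk then rt.2 + 1 else rt.2))
            (List.replicate (w.length + 1) 0, st.2))
        (prev, t)).2)
      = t + ((List.range cnt).map (rowCnt w kk)).sum := by
  induction cnt with
  | zero => intro _ prev t _ _; simp
  | succ c ih =>
    intro hc prev t hlen hinv
    have hr : (List.range (c + 1)).reverse = c :: (List.range c).reverse := by
      rw [List.range_succ]; simp
    rw [hr, List.foldl_cons]
    have e1 : (prev, t).1 = prev := rfl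
    have e2 : (prev, t).2 = t := rfl
    rw [e1, e2]
    set jl := List.range' (c + 1) (w.length - c) with hjl
    have hg_eq : ∀ j, c + 1 ≤ j → j ≤ w.length → gOf w prev c j = msmIJ w c j := by
      intro j h1 h2
      by_cases hj1 : j = c + 1
      · subst hj1
        unfold gOf
        simp [msmIJ_small w c (c + 1) (by omega)]
      · have h3 : c + 2 ≤ j := by omega
        unfold gOf
        rw [if_neg hj1, hinv (j - 1) (by omega) (by omega), msm_rec w c j h3 h2]
    set P := jl.foldl
        (fun (rt : List Int × Int) j =>
          (rt.1.set j (gOf w prev c j), if gOf w prev c j ≤ kk then rt.2 + 1 else rt.2))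
        (List.replicate (w.length + 1) 0, t) with hPdef
    have hP2 : P.2 = t + (jl.countP (fun j => decide (gOf w prev c j ≤ kk)) : Int) := by
      rw [hPdef]; exact inner_snd (gOf w prev c) kk jl _ t
    have hP1 : P.1 = jl.foldl (fun r j => r.set j (gOf w prev c j)) (List.replicate (w.length + 1) 0) := by
      rw [hPdef]; exact inner_fst (gOf w prev c) kk jl _ t
    have hP1len : P.1.length = w.length + 1 := by
      rw [hP1, setFold_length]; simp
    have hP1inv : ∀ q, c ≤ q → q ≤ w.length → P.1.getD q 0 = msmIJ w c q := by
      intro q hq1 hq2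
      rw [hP1, setFold_getD (gOf w prev c) jl List.nodup_range' _ q (by simp; omega)]
      by_cases hqm : q ∈ jl
      · have hm := List.mem_range'_1.mp (hjl ▸ hqm)
        rw [if_pos hqm]
        exact hg_eq q hm.1 (by omega)
      · have hqc : q = c := by
          by_contra hne
          exact hqm (hjl ▸ List.mem_range'_1.mpr ⟨by omega, by omega⟩)
        rw [if_neg hqm, hqc, msmIJ_small w c c (by omega)]
        simp
    have key := ih (by omega) P.1 P.2 hP1len hP1inv
    have hPeta : ((P.1 : List Int), (P.2 : Int)) = P := rfl
    rw [hPeta] at key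
    rw [key, hP2]
    have hcnt : (jl.countP (fun j => decide (gOf w prev c j ≤ kk)) : Int) = rowCnt w kk c := by
      unfold rowCnt
      rw [← hjl]
      congr 1
      refine List.countP_congr ?_
      intro j hjm
      have hm := List.mem_range'_1.mp (hjl ▸ hjm)
      rw [hg_eq j hm.1 (by omega)]
    rw [hcnt, List.range_succ, List.map_append, List.sum_append]
    simp
    ring

-- port A as the reference sum
lemma A_eq (word : String) (k : Int) :
    count_almost_palindromes word k
      = ((List.range word.toList.length).map (rowCnt word.toList (max k 0))).sum := by
  show (List.range word.toList.length).foldl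
      (fun count i =>
        (List.range' (i + 1) (word.toList.length - i)).foldl
          (fun (count : Int) (j : Nat) =>
            if is_almost_palindrome (PySem.List.slice word.toList (some (i : Int)) (some (j : Int))) k
            then count + 1 else count)
          count)
      0 = _
  have hfun : ∀ (acc : Int) (i : Nat), i ∈ List.range word.toList.length →
      (List.range' (i + 1) (word.toList.length - i)).foldl
        (fun (count : Int) (j : Nat) =>
          if is_almost_palindrome (PySem.List.slice word.toList (some (i : Int)) (some (j : Int))) k
          then count + 1 else count) acc
      = acc + rowCnt word.toList (max k 0) i := by
    intro acc i _
    rw [foldl_count]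
    congr 1
    unfold rowCnt
    congr 1
    refine List.countP_congr ?_
    intro j _
    rw [isap_eq, PySem.List.slice_natCast]
    rfl
  rw [PySem.List.foldl_congr_mem _ _ _ _ hfun, PySem.List.foldl_add]
  simp

-- port B as the reference sum
lemma B_eq (word : String) (k : Int) :
    count_almost_palindromes_alt word k
      = ((List.range word.toList.length).map (rowCnt word.toList (max k 0))).sum := by
  have hkk : (if k > 0 then k else 0) = max k 0 := by
    rw [max_def]; split_ifs <;> omega
  have h0 : count_almost_palindromes_alt word k
      = (((List.range word.toList.length).reverse.foldl
          (fun (st : List Int × Int) i =>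
            (List.range' (i + 1) (word.toList.length - i)).foldl
              (fun (rt : List Int × Int) j =>
                (rt.1.set j (gOf word.toList st.1 i j),
                 if gOf word.toList st.1 i j ≤ (if k > 0 then k else 0) then rt.2 + 1 else rt.2))
              (List.replicate (word.toList.length + 1) 0, st.2))
          (List.replicate (word.toList.length + 1) 0, 0)).2) := rfl
  rw [h0, hkk]
  rw [outer_fold word.toList (max k 0) word.toList.length (le_refl _)
        (List.replicate (word.toList.length + 1) 0) 0 (by simp) ?_]
  · simp
  · intro q hq1 hq2
    have hq : q = word.toList.length := by omega
    rw [hq, msmIJ_small _ _ _ (by omega)]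
    simp

-- ===== VERDICT (by name: the statement is the Claim_ definition above) =====
theorem count_almost_palindromes_spec : Claim_equal_count_almost_palindromes := by
  intro word k _
  unfold Spec_count_almost_palindromes
  rw [A_eq, B_eq]
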